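-- pv_equiv track=rewrite | github.com/CaetanoCOC/Prospector | backend/core/scraper.py | _filter_emails
-- ===== SOURCE A (Python) =====
-- FAKE_DOMAINS = {"example", "sentry", "test", "domain", "wixpress", "squarespace",
--                 "shopify", "wordpress", "cloudflare", "google", "facebook",
--                 "instagram", "twitter", "yelp", "tripadvisor"}
--
-- def _filter_emails(emails: list[str], site_domain: str) -> list[str]:
--     clean = []
--     for email in emails:
--         email = email.lower().strip(".")
--         domain_part = email.split("@")[-1] if "@" in email else ""
--         base = domain_part.split(".")[0] if domain_part else ""
--
--         # Skip known fake domains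
--         if any(fake in domain_part for fake in FAKE_DOMAINS):
--             continue
--         # Skip image-like patterns
--         if any(email.endswith(ext) for ext in [".png", ".jpg", ".gif", ".svg", ".webp"]):
--             continue
--         # Skip very long email addresses (likely obfuscated)
--         if len(email) > 80:
--             continue
--
--         clean.append(email)
--
--     if not clean:
--         return []
--
--     # Prioritize emails from same domain as the site
--     if site_domain:
--         same_domain = [e for e in clean if site_domain in e]
--         if same_domain:
--             return [same_domain[0]]
--
--     return [clean[0]]
-- ===== SOURCE B (Python) =====
-- FAKE_DOMAINS = {"example", "sentry", "test", "domain", "wixpress", "squarespace",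
--                 "shopify", "wordpress", "cloudflare", "google", "facebook",
--                 "instagram", "twitter", "yelp", "tripadvisor"}
--
-- def _filter_emails(emails: list[str], site_domain: str) -> list[str]:
--     # Single pass: keep only the first clean email; return immediately on a
--     # same-domain match.  No intermediate clean list is built.
--     first_clean = None
--     for email in emails:
--         email = email.lower().strip(".")
--         domain_part = email.split("@")[-1] if "@" in email else ""
--         if any(fake in domain_part for fake in FAKE_DOMAINS):
--             continue
--         if any(email.endswith(ext) for ext in (".png", ".jpg", ".gif", ".svg", ".webp")):
--             continue
--         if len(email) > 80:
--             continue
--         if site_domain and site_domain in email: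
--             return [email]
--         if first_clean is None:
--             first_clean = email
--     return [first_clean] if first_clean is not None else []
-- ===== Notes on version B (the rewrite author's own statement) =====
-- stated objective: simpler
-- what changed: Replaces A's build-full-clean-list-then-two-post-passes (filter for same-domain, then index) with a single pass that keeps only the first clean email and returns immediately on the first same-domain match.
import Mathlib
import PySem

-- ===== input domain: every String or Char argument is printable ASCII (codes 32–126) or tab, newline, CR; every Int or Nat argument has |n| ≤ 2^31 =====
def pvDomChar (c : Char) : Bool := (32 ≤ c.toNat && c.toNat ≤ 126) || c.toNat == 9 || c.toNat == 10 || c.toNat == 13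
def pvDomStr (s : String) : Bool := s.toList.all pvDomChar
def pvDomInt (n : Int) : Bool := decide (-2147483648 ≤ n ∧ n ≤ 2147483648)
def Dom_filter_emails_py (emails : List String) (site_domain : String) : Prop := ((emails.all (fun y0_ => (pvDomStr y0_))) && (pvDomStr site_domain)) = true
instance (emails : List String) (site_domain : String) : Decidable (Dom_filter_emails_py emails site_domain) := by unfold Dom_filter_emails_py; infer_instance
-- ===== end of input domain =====

-- B replaces A's build-full-clean-list-then-two-post-passes with a single pass that keeps
-- only the first clean email and returns immediately on the first same-domain match (objective: simpler).

-- ===== PORT A =====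
-- FAKE_DOMAINS: a Python set literal of distinct strings; `any(fake in … for fake in FAKE_DOMAINS)`
-- is order-independent over the set, so iterating the PySem.Set is exact.
def pvFakeDomains : PySem.Set String := PySem.Set.ofList
  ["example", "sentry", "test", "domain", "wixpress", "squarespace",
   "shopify", "wordpress", "cloudflare", "google", "facebook",
   "instagram", "twitter", "yelp", "tripadvisor"]

def pvImageExts : List String := [".png", ".jpg", ".gif", ".svg", ".webp"]

-- email.lower().strip(".")
def pvNorm (email : String) : String := PySem.Str.stripChars (PySem.Str.lower email) "."

-- email.split("@")[-1] if "@" in email else ""   ("@" ≠ "" so split? is always some; [-1] = last element)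
def pvMailDomain (e : String) : String :=
  if PySem.Str.isIn "@" e then ((PySem.Str.split? e "@").getD []).getLastD "" else ""

-- the loop body of A (`base` in A is computed but never used; omitted)
def pvStepA (acc : List String) (email : String) : List String :=
  let e := pvNorm email
  let domain_part := pvMailDomain e
  if pvFakeDomains.any (fun fake => PySem.Str.isIn fake domain_part) then acc
  else if pvImageExts.any (fun ext => PySem.Str.endswith e ext) then acc
  else if PySem.Str.len e > 80 then acc
  else acc ++ [e]

def filter_emails_py (emails : List String) (site_domain : String) : List String :=
  let clean := emails.foldl pvStepA []
  match clean with
  | [] => []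
  | c0 :: _ =>
    if site_domain = "" then [c0]
    else
      match clean.filter (fun e => PySem.Str.isIn site_domain e) with
      | s :: _ => [s]
      | [] => [c0]

-- ===== PORT B =====
-- the loop of Source B: the only state is `first_clean : Option String`
def pvGoB (site_domain : String) : List String → Option String → List String
  | [], first => match first with | some f => [f] | none => []
  | email :: rest, first =>
    let e := pvNorm email
    let domain_part := pvMailDomain e
    if pvFakeDomains.any (fun fake => PySem.Str.isIn fake domain_part) then pvGoB site_domain rest first
    else if pvImageExts.any (fun ext => PySem.Str.endswith e ext) then pvGoB site_domain rest first
    else if PySem.Str.len e > 80 then pvGoB site_domain rest first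
    else if site_domain ≠ "" ∧ PySem.Str.isIn site_domain e = true then [e]
    else pvGoB site_domain rest (some (first.getD e))

def filter_emails_py_alt (emails : List String) (site_domain : String) : List String :=
  pvGoB site_domain emails none

-- ===== PRECONDITION & SPEC =====
def Spec_filter_emails_py (emails : List String) (site_domain : String) (out : List String) : Prop := out = filter_emails_py_alt emails site_domain
instance (emails : List String) (site_domain : String) (out : List String) : Decidable (Spec_filter_emails_py emails site_domain out) := by unfold Spec_filter_emails_py; infer_instance

-- ===== CLAIM (what is proved, stated in full; the proofs are below) =====
def Claim_equal_filter_emails_py : Prop := ∀ (emails : List String) (site_domain : String), Dom_filter_emails_py emails site_domain → Spec_filter_emails_py emails site_domain (filter_emails_py emails site_domain)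

-- ===== LEMMAS AND PROOFS =====

-- the three skip conditions and the per-email keep predicate shared by both loops
def pvCond1 (e : String) : Bool := pvFakeDomains.any (fun fake => PySem.Str.isIn fake (pvMailDomain e))
def pvCond2 (e : String) : Bool := pvImageExts.any (fun ext => PySem.Str.endswith e ext)
def pvKeep (e : String) : Bool := !(pvCond1 e) && !(pvCond2 e) && !(decide (PySem.Str.len e > 80))

def pvCleanOf (emails : List String) : List String := (emails.map pvNorm).filter pvKeep

-- A's tail (everything after the loop) as a function of the clean list
def pvPostA (site_domain : String) (clean : List String) : List String :=
  match clean with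
  | [] => []
  | c0 :: _ =>
    if site_domain = "" then [c0]
    else
      match clean.filter (fun e => PySem.Str.isIn site_domain e) with
      | s :: _ => [s]
      | [] => [c0]

theorem pvKeep_false₁ (e : String) (h : pvCond1 e = true) : pvKeep e = false := by
  simp [pvKeep, h]

theorem pvKeep_false₂ (e : String) (h : pvCond2 e = true) : pvKeep e = false := by
  simp [pvKeep, h]

theorem pvKeep_false₃ (e : String) (h : PySem.Str.len e > 80) : pvKeep e = false := by
  have h' : 80 < e.length := by simpa using h
  simp [pvKeep, h']

theorem pvKeep_true (e : String) (h1 : ¬ pvCond1 e = true) (h2 : ¬ pvCond2 e = true)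
    (h3 : ¬ PySem.Str.len e > 80) : pvKeep e = true := by
  have h3' : e.length ≤ 80 := by simpa [not_lt] using h3
  simp [pvKeep, h1, h2, h3']

theorem pvStepA_eq (acc : List String) (email : String) :
    pvStepA acc email = if pvKeep (pvNorm email) then acc ++ [pvNorm email] else acc := by
  show (if pvCond1 (pvNorm email) = true then acc
        else if pvCond2 (pvNorm email) = true then acc
        else if PySem.Str.len (pvNorm email) > 80 then acc
        else acc ++ [pvNorm email]) = _
  by_cases h1 : pvCond1 (pvNorm email) = true
  · rw [if_pos h1, pvKeep_false₁ _ h1]; rfl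
  · rw [if_neg h1]
    by_cases h2 : pvCond2 (pvNorm email) = true
    · rw [if_pos h2, pvKeep_false₂ _ h2]; rfl
    · rw [if_neg h2]
      by_cases h3 : PySem.Str.len (pvNorm email) > 80
      · rw [if_pos h3, pvKeep_false₃ _ h3]; rfl
      · rw [if_neg h3, pvKeep_true _ h1 h2 h3]; rfl

theorem pvCleanOf_cons (email : String) (rest : List String) :
    pvCleanOf (email :: rest) =
      if pvKeep (pvNorm email) then pvNorm email :: pvCleanOf rest else pvCleanOf rest := by
  unfold pvCleanOf
  rw [List.map_cons, List.filter_cons]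

theorem pvFoldA_eq (emails : List String) (acc : List String) :
    emails.foldl pvStepA acc = acc ++ pvCleanOf emails := by
  induction emails generalizing acc with
  | nil => simp [pvCleanOf]
  | cons email rest ih =>
    rw [List.foldl_cons, pvStepA_eq, pvCleanOf_cons]
    by_cases hk : pvKeep (pvNorm email) = true
    · rw [if_pos hk, if_pos hk, ih, List.append_assoc, List.singleton_append]
    · rw [if_neg hk, if_neg hk, ih]

theorem pvA_eq_post (emails : List String) (site_domain : String) :
    filter_emails_py emails site_domain = pvPostA site_domain (pvCleanOf emails) := by
  unfold filter_emails_py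
  rw [pvFoldA_eq, List.nil_append]
  rfl

theorem pvPostA_cons (site_domain c0 : String) (R : List String) :
    pvPostA site_domain (c0 :: R) =
      if site_domain = "" then [c0]
      else
        match (c0 :: R).filter (fun e => PySem.Str.isIn site_domain e) with
        | s :: _ => [s]
        | [] => [c0] := rfl

theorem pvPostA_head (site_domain c0 : String) (R : List String) (hs : site_domain = "") :
    pvPostA site_domain (c0 :: R) = [c0] := by
  rw [pvPostA_cons, if_pos hs]

-- dropping a non-matching element after the head does not change A's tail
theorem pvPostA_drop (site_domain f e : String) (cl : List String)
    (hs : ¬ site_domain = "") (he : PySem.Str.isIn site_domain e = false) :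
    pvPostA site_domain (f :: e :: cl) = pvPostA site_domain (f :: cl) := by
  have hfe : (f :: e :: cl).filter (fun x => PySem.Str.isIn site_domain x) =
      (f :: cl).filter (fun x => PySem.Str.isIn site_domain x) := by
    simp only [List.filter_cons, he, Bool.false_eq_true, if_false]
  rw [pvPostA_cons, pvPostA_cons, if_neg hs, if_neg hs, hfe]

theorem pvGoB_eq (site_domain : String) (emails : List String) (first : Option String)
    (hf : ∀ f, first = some f → ¬ site_domain = "" → PySem.Str.isIn site_domain f = false) :
    pvGoB site_domain emails first = pvPostA site_domain (first.toList ++ pvCleanOf emails) := by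
  induction emails generalizing first with
  | nil =>
    match first with
    | none => rfl
    | some f =>
      show [f] = pvPostA site_domain [f]
      by_cases hs : site_domain = ""
      · rw [pvPostA_head _ _ _ hs]
      · rw [pvPostA_cons, if_neg hs]
        simp only [List.filter_cons, hf f rfl hs, Bool.false_eq_true, if_false, List.filter_nil]
  | cons email rest ih =>
    show (if pvCond1 (pvNorm email) = true then pvGoB site_domain rest first
          else if pvCond2 (pvNorm email) = true then pvGoB site_domain rest first
          else if PySem.Str.len (pvNorm email) > 80 then pvGoB site_domain rest first
          else if site_domain ≠ "" ∧ PySem.Str.isIn site_domain (pvNorm email) = true then [pvNorm email]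
          else pvGoB site_domain rest (some (first.getD (pvNorm email)))) =
        pvPostA site_domain (first.toList ++ pvCleanOf (email :: rest))
    by_cases h1 : pvCond1 (pvNorm email) = true
    · rw [if_pos h1, pvCleanOf_cons, pvKeep_false₁ _ h1]
      exact ih first hf
    · rw [if_neg h1]
      by_cases h2 : pvCond2 (pvNorm email) = true
      · rw [if_pos h2, pvCleanOf_cons, pvKeep_false₂ _ h2]
        exact ih first hf
      · rw [if_neg h2]
        by_cases h3 : PySem.Str.len (pvNorm email) > 80
        · rw [if_pos h3, pvCleanOf_cons, pvKeep_false₃ _ h3]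
          exact ih first hf
        · rw [if_neg h3, pvCleanOf_cons, pvKeep_true _ h1 h2 h3]
          by_cases h4 : site_domain ≠ "" ∧ PySem.Str.isIn site_domain (pvNorm email) = true
          · -- kept, and it matches the site domain: B returns [e] at once
            rw [if_pos h4]
            obtain ⟨hs, hin⟩ := h4
            match first with
            | none =>
              show [pvNorm email] = pvPostA site_domain (pvNorm email :: pvCleanOf rest)
              rw [pvPostA_cons, if_neg hs]
              simp only [List.filter_cons, hin, if_true]
            | some f =>
              show [pvNorm email] = pvPostA site_domain (f :: pvNorm email :: pvCleanOf rest)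
              rw [pvPostA_cons, if_neg hs]
              simp only [List.filter_cons, hin, hf f rfl hs, Bool.false_eq_true, if_false, if_true]
          · -- kept but no same-domain early return: record it as first_clean if none yet
            rw [if_neg h4]
            have hin : ¬ site_domain = "" → PySem.Str.isIn site_domain (pvNorm email) = false := by
              intro hs
              cases hi : PySem.Str.isIn site_domain (pvNorm email)
              · rfl
              · exact absurd ⟨hs, hi⟩ h4
            match first with
            | none =>
              rw [ih (some ((none : Option String).getD (pvNorm email)))
                    (by rintro g hg hs
                        rw [Option.getD_none, Option.some.injEq] at hg
                        subst hg; exact hin hs)]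
              rfl
            | some f =>
              rw [ih (some ((some f).getD (pvNorm email)))
                    (by rintro g hg hs
                        rw [Option.getD_some, Option.some.injEq] at hg
                        subst hg; exact hf f rfl hs)]
              show pvPostA site_domain (f :: pvCleanOf rest) =
                   pvPostA site_domain (f :: pvNorm email :: pvCleanOf rest)
              by_cases hs : site_domain = ""
              · rw [pvPostA_head _ _ _ hs, pvPostA_head _ _ _ hs]
              · rw [pvPostA_drop _ _ _ _ hs (hin hs)]

-- ===== VERDICT (by name: the statement is the Claim_ definition above) =====
theorem filter_emails_py_spec : Claim_equal_filter_emails_py := by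
  intro emails site_domain _
  unfold Spec_filter_emails_py filter_emails_py_alt
  rw [pvA_eq_post, pvGoB_eq site_domain emails none (by intro f h; cases h)]
  rfl
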